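-- pv_equiv track=rewrite | github.com/FisaDevTeam/Python-Image-steganography | main.py | pixel_modifier
-- ===== SOURCE A (Python) =====
-- def binary_list(data):
--   return [format(ord(i), '08b') for i in data]
--
-- def pixel_modifier(pix, toEncode):
--   bin_list = binary_list(toEncode)
--   len_bin_list = len(bin_list)
--   img_data = iter(pix)
--
--   for i in range(len_bin_list):
--     pix = [value for value in img_data.__next__()[:3] + img_data.__next__()[:3] + img_data.__next__()[:3]]
--
--     #Pixel value is made odd for 1 and even for 0 binary code (while keeping it between 0 and 255)
--     for j in range(0, 8): #8 for 8-bit binary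
--       if bin_list[i][j] == '0' and pix[j]% 2 != 0:
--         pix[j] -= 1
--
--       elif bin_list[i][j] == '1' and pix[j] % 2 == 0:
--         if pix[j] == 0:
--           pix[j] += 1
--         else:
--           pix[j] -= 1
--
--     #For every data set, eigth pixel says whether to stop or to keep reading
--     #0=keep reading, 1=stop
--
--     if i + 1 == len_bin_list:
--       if pix[-1] % 2 == 0:
--         if pix[-1] == 0:
--           pix[-1] += 1
--         else:
--           pix[-1] -= 1
--     else:
--       if pix[-1] % 2 != 0:
--         pix[-1] -= 1
--
--     #Return pixel tuple
--     pix = tuple(pix)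
--     yield pix[0:3]
--     yield pix[3:6]
--     yield pix[6:9]
-- ===== SOURCE B (Python) =====
-- def pixel_modifier(pix, toEncode):
--     # Stage 1: one flat bit stream for the whole message, built arithmetically:
--     # 8 data bits per character (MSB first) plus a 0 separator; the very last
--     # separator is patched to 1 (the stop flag).
--     bits = []
--     for c in toEncode:
--         bits.extend((ord(c) >> k) & 1 for k in range(7, -1, -1))
--         bits.append(0)
--     if bits:
--         bits[len(bits) - 1] = 1
--     # Stage 2: flatten the pixel channels and keep just as many as there are bits.
--     flat = [v for p in pix for v in p][:len(bits)]
--     # Stage 3: one branch-free arithmetic parity fix over a single zip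
--     # (strict: every bit needs a pixel channel; raises if pix is too short, as A does).
--     new = [v + abs(v % 2 - b) * (1 if v == 0 else -1) for v, b in zip(flat, bits, strict=True)]
--     # Stage 4: regroup into 3-tuples.
--     return [tuple(new[i:i + 3]) for i in range(0, len(new), 3)]
-- ===== Notes on version B (the rewrite author's own statement) =====
-- stated objective: alternative
-- what changed: B is a staged pipeline over the whole message: it precomputes one flat 9n-bit stream arithmetically (bit shifts and a terminator patched in place), flattens the pixel channels, applies a single branch-free arithmetic parity-fix formula over one zip, and regroups into 3-tuples - replacing A's per-character iterator loop with its nested 8-bit branch chain and separate stop-flag cases.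
import Mathlib
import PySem

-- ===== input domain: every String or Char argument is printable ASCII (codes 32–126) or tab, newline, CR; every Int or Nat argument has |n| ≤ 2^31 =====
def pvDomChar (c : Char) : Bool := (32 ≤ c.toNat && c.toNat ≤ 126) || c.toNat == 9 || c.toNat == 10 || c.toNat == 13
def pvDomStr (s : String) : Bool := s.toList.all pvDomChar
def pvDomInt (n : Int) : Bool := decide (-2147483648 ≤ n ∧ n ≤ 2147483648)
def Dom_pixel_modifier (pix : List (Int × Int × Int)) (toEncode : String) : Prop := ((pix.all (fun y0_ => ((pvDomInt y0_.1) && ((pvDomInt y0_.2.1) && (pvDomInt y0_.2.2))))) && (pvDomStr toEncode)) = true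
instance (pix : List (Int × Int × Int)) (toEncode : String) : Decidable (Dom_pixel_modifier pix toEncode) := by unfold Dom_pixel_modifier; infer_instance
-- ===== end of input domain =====

-- B replaces A's per-character loop (8-bit branch chain + stop-flag cases) by a staged
-- whole-message pipeline: flat bit stream, flattened channels, one arithmetic parity fix, regroup
-- (objective: alternative decomposition). Both Pythons yield a sequence; equivalence is about it as a list.

-- ===== PORT A =====
-- format(n, '08b') as a list of bit characters; exact for 0 ≤ n < 256 (all of Dom's chars)
def pvBit (n k : Nat) : Char := if (n >>> (7 - k)) % 2 = 1 then '1' else '0'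
def pvFormat08b (n : Nat) : List Char := (List.range 8).map (pvBit n)

-- binary_list(data): the 8-char strings are ported as lists of chars (indexed char-wise, as A does)
def pvBinaryList (data : String) : List (List Char) := data.toList.map (fun c => pvFormat08b c.toNat)

-- the generator loop: one step per character, consuming three pixels from the iterator (here: the
-- remaining list); when the iterator is exhausted Python raises (RuntimeError) — excluded by Pre_.
def pvGoA (bins : List (List Char)) (i lenB : Nat) (img : List (Int × Int × Int)) : List (Int × Int × Int) :=
  match bins, img with
  | bts :: rest, (a1, a2, a3) :: (b1, b2, b3) :: (c1, c2, c3) :: imgRest =>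
      -- pix = the 9 channel values of the next three pixels ([:3] of a 3-tuple is the whole tuple)
      let pix0 : List Int := [a1, a2, a3, b1, b2, b3, c1, c2, c3]
      -- for j in range(0, 8): the branches assign pix[j]; ported as one set with the branch value
      let pix1 := (List.range 8).foldl (fun acc j =>
        acc.set j (
          if bts.getD j ' ' = '0' ∧ PySem.Int.mod (acc.getD j 0) 2 ≠ 0 then acc.getD j 0 - 1
          else if bts.getD j ' ' = '1' ∧ PySem.Int.mod (acc.getD j 0) 2 = 0 then
            (if acc.getD j 0 = 0 then acc.getD j 0 + 1 else acc.getD j 0 - 1)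
          else acc.getD j 0)) pix0
      -- pix[-1] is index 8 of the 9-element list
      let lv := pix1.getD 8 0
      let pix2 := pix1.set 8 (
        if i + 1 = lenB then
          (if PySem.Int.mod lv 2 = 0 then (if lv = 0 then lv + 1 else lv - 1) else lv)
        else (if PySem.Int.mod lv 2 ≠ 0 then lv - 1 else lv))
      -- yield pix[0:3]; yield pix[3:6]; yield pix[6:9]
      (pix2.getD 0 0, pix2.getD 1 0, pix2.getD 2 0) ::
      (pix2.getD 3 0, pix2.getD 4 0, pix2.getD 5 0) ::
      (pix2.getD 6 0, pix2.getD 7 0, pix2.getD 8 0) :: pvGoA rest (i + 1) lenB imgRest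
  | _, _ => []  -- StopIteration inside the generator (RuntimeError): outside Pre_

def pixel_modifier (pix : List (Int × Int × Int)) (toEncode : String) : List (Int × Int × Int) :=
  pvGoA (pvBinaryList toEncode) 0 (pvBinaryList toEncode).length pix

-- ===== PORT B =====
-- the 8 data bits of one character, MSB first, as integers: (ord(c) >> k) & 1 for k = 7..0
def pvBits8 (c : Char) : List Int := (List.range 8).map (fun j => (((c.toNat >>> (7 - j)) % 2 : Nat) : Int))

-- [tuple(new[i:i+3]) for i in range(0, len(new), 3)]; a remainder shorter than 3 would be a
-- short tuple (never happens under Pre_: len(new) is a multiple of 9), here dropped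
def pvChunk3 (l : List Int) : List (Int × Int × Int) :=
  match l with
  | a :: b :: c :: rest => (a, b, c) :: pvChunk3 rest
  | _ => []

def pixel_modifier_alt (pix : List (Int × Int × Int)) (toEncode : String) : List (Int × Int × Int) :=
  -- Stage 1: flat bit stream (8 data bits + 0 separator per char; last separator patched to 1)
  let bits := toEncode.toList.foldl (fun acc c => acc ++ pvBits8 c ++ [0]) []
  let bits1 := if bits.isEmpty then bits else bits.set (bits.length - 1) 1
  -- Stage 2: flatten the channels, keep len(bits) of them ([:len(bits)])
  let flat := PySem.List.slice (pix.flatMap (fun p => [p.1, p.2.1, p.2.2])) none (some ((bits1.length : Nat) : Int))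
  -- Stage 3: one arithmetic parity fix over a single zip; Source B's strict=True raises when
  -- pix is too short (outside Pre_); inside Pre_ the lengths are equal, so plain zip is exact
  let new := (flat.zip bits1).map (fun vb =>
    vb.1 + |PySem.Int.mod vb.1 2 - vb.2| * (if vb.1 = 0 then 1 else -1))
  -- Stage 4: regroup into 3-tuples
  pvChunk3 new

-- ===== PRECONDITION & SPEC =====
-- A raises RuntimeError (StopIteration in the generator) when pix has fewer than 3 pixels per character
def Pre_pixel_modifier (pix : List (Int × Int × Int)) (toEncode : String) : Prop :=
  3 * toEncode.toList.length ≤ pix.length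
instance (pix : List (Int × Int × Int)) (toEncode : String) : Decidable (Pre_pixel_modifier pix toEncode) := by
  unfold Pre_pixel_modifier; infer_instance

def pvWitness_pixel_modifier : (List (Int × Int × Int)) × String :=
  ([(10, 11, 12), (13, 14, 15), (16, 17, 18)], "A")

def Spec_pixel_modifier (pix : List (Int × Int × Int)) (toEncode : String) (out : List (Int × Int × Int)) : Prop := out = pixel_modifier_alt pix toEncode
instance (pix : List (Int × Int × Int)) (toEncode : String) (out : List (Int × Int × Int)) : Decidable (Spec_pixel_modifier pix toEncode out) := by unfold Spec_pixel_modifier; infer_instance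

-- ===== CLAIM (what is proved, stated in full; the proofs are below) =====
def Claim_equal_pixel_modifier : Prop := ∀ (pix : List (Int × Int × Int)) (toEncode : String), Dom_pixel_modifier pix toEncode → Pre_pixel_modifier pix toEncode → Spec_pixel_modifier pix toEncode (pixel_modifier pix toEncode)

-- ===== LEMMAS AND PROOFS =====

-- B's bit stream, characterised recursively with A's loop counters: 8 data bits per char
-- plus the continuation bit 'i + pos + 1 = n'
def pvBitsGen (chars : List Char) (i n : Nat) : List Int :=
  match chars with
  | [] => []
  | c :: rest => pvBits8 c ++ (if i + 1 = n then (1:Int) else 0) :: pvBitsGen rest (i + 1) n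

lemma pvBitsGen_len : ∀ (chars : List Char) (i n : Nat), (pvBitsGen chars i n).length = 9 * chars.length := by
  intro chars
  induction chars with
  | nil => intro i n; simp [pvBitsGen]
  | cons c rest ih => intro i n; simp [pvBitsGen, pvBits8, ih]; ring

-- A's branch pair for one data bit equals B's arithmetic rule
lemma pvStepEq (n k : Nat) (v : Int) :
    (if pvBit n k = '0' ∧ PySem.Int.mod v 2 ≠ 0 then v - 1
     else if pvBit n k = '1' ∧ PySem.Int.mod v 2 = 0 then (if v = 0 then v + 1 else v - 1) else v)
    = v + |PySem.Int.mod v 2 - (((n >>> (7 - k)) % 2 : Nat) : Int)| * (if v = 0 then 1 else -1) := by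
  have hm : (n >>> (7 - k)) % 2 = 0 ∨ (n >>> (7 - k)) % 2 = 1 := Nat.mod_two_eq_zero_or_one _
  rw [show PySem.Int.mod v 2 = v % 2 from PySem.Int.mod_eq_emod_of_pos (by norm_num)]
  have hv := Int.emod_two_eq v
  unfold pvBit
  rcases hm with h | h <;> rw [h] <;> rcases hv with hv | hv <;> rw [hv] <;> simp <;> split_ifs <;> omega

-- A's stop-flag branch equals B's arithmetic rule on the continuation bit
lemma pvLastEq (q : Prop) [Decidable q] (v : Int) :
    (if q then (if PySem.Int.mod v 2 = 0 then (if v = 0 then v + 1 else v - 1) else v)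
     else (if PySem.Int.mod v 2 ≠ 0 then v - 1 else v))
    = v + |PySem.Int.mod v 2 - (if q then (1:Int) else 0)| * (if v = 0 then 1 else -1) := by
  rw [show PySem.Int.mod v 2 = v % 2 from PySem.Int.mod_eq_emod_of_pos (by norm_num)]
  have hv := Int.emod_two_eq v
  by_cases hq : q <;> rcases hv with hv | hv <;> rw [hv] <;> simp [hq] <;> split_ifs <;> omega

-- the j-loop writes position j from its old value only: it is an index-wise map
lemma pvFoldlSet (g : Nat → Int → Int) :
    ∀ (n : Nat) (xs : List Int),
      (List.range n).foldl (fun acc j => acc.set j (g j (acc.getD j 0))) xs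
        = xs.mapIdx (fun j v => if j < n then g j v else v) := by
  intro n
  induction n with
  | zero => intro xs; apply List.ext_getElem <;> simp
  | succ m ih =>
    intro xs
    rw [List.range_succ, List.foldl_append, List.foldl_cons, List.foldl_nil, ih]
    apply List.ext_getElem
    · simp
    · intro k hk1 hk2
      simp only [List.length_set, List.length_mapIdx] at hk1
      rw [List.getElem_set, List.getElem_mapIdx]
      by_cases hkm : m = k
      · subst hkm
        rw [if_pos rfl, List.getElem_mapIdx, if_pos (by omega)]
        have hget : (xs.mapIdx (fun j v => if j < m then g j v else v)).getD m 0 = xs[m] := by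
          rw [List.getD_eq_getElem?_getD, List.getElem?_eq_getElem (by simpa using hk1)]
          simp only [Option.getD_some, List.getElem_mapIdx, lt_self_iff_false, if_false]
        rw [hget]
      · rw [if_neg hkm, List.getElem_mapIdx]
        by_cases hlt : k < m
        · rw [if_pos hlt, if_pos (by omega)]
        · rw [if_neg hlt, if_neg (by omega)]

-- main correspondence: A's generator loop = B's take/zip/map/chunk pipeline with the recursive bit stream
set_option maxHeartbeats 1600000 in
lemma pvGoAB : ∀ (chars : List Char) (i n : Nat) (img : List (Int × Int × Int)),
    3 * chars.length ≤ img.length →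
    pvGoA (chars.map (fun c => pvFormat08b c.toNat)) i n img
      = pvChunk3 ((((img.flatMap (fun p => [p.1, p.2.1, p.2.2])).take (9 * chars.length)).zip
          (pvBitsGen chars i n)).map (fun vb =>
            vb.1 + |PySem.Int.mod vb.1 2 - vb.2| * (if vb.1 = 0 then 1 else -1))) := by
  intro chars
  induction chars with
  | nil => intro i n img _; simp [pvGoA, pvBitsGen, pvChunk3]
  | cons c rest ih =>
    intro i n img hlen
    have hd : 3 ≤ img.length := by simp only [List.length_cons] at hlen; omega
    obtain ⟨p0, d0, h0⟩ := List.exists_cons_of_ne_nil (show img ≠ [] by intro h; rw [h] at hd; simp at hd)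
    rw [h0] at hd
    obtain ⟨p1, d1, h1⟩ := List.exists_cons_of_ne_nil (show d0 ≠ [] by intro h; rw [h] at hd; simp at hd)
    rw [h1] at hd
    obtain ⟨p2, d2, h2⟩ := List.exists_cons_of_ne_nil (show d1 ≠ [] by intro h; rw [h] at hd; simp at hd)
    subst h0 h1 h2
    obtain ⟨a1, a2, a3⟩ := p0
    obtain ⟨b1, b2, b3⟩ := p1
    obtain ⟨c1, c2, c3⟩ := p2
    have ihr := ih (i + 1) n d2 (by simp only [List.length_cons] at hlen ⊢; omega)
    -- peel the first 9 flattened channel values and the first 9 bits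
    have hflat : (((a1, a2, a3) :: (b1, b2, b3) :: (c1, c2, c3) :: d2).flatMap
        (fun p => [p.1, p.2.1, p.2.2]))
        = a1 :: a2 :: a3 :: b1 :: b2 :: b3 :: c1 :: c2 :: c3 ::
          (d2.flatMap (fun p => [p.1, p.2.1, p.2.2])) := by
      simp [List.flatMap_cons]
    have htake : List.take (9 * (c :: rest).length)
        (a1 :: a2 :: a3 :: b1 :: b2 :: b3 :: c1 :: c2 :: c3 ::
          (d2.flatMap (fun p => [p.1, p.2.1, p.2.2])))
        = a1 :: a2 :: a3 :: b1 :: b2 :: b3 :: c1 :: c2 :: c3 ::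
          List.take (9 * rest.length) (d2.flatMap (fun p => [p.1, p.2.1, p.2.2])) := by
      rw [show 9 * (c :: rest).length = 9 + 9 * rest.length by simp [Nat.mul_add]; ring,
        List.take_add]
      rfl
    rw [hflat, htake]
    show pvGoA (pvFormat08b c.toNat :: rest.map (fun c => pvFormat08b c.toNat)) i n _ = _
    rw [pvGoA]
    rw [pvFoldlSet (fun j v =>
      if (pvFormat08b c.toNat).getD j ' ' = '0' ∧ PySem.Int.mod v 2 ≠ 0 then v - 1
      else if (pvFormat08b c.toNat).getD j ' ' = '1' ∧ PySem.Int.mod v 2 = 0 then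
        (if v = 0 then v + 1 else v - 1)
      else v) 8]
    have hfmt : pvFormat08b c.toNat
        = [pvBit c.toNat 0, pvBit c.toNat 1, pvBit c.toNat 2, pvBit c.toNat 3,
           pvBit c.toNat 4, pvBit c.toNat 5, pvBit c.toNat 6, pvBit c.toNat 7] := rfl
    have hbits : pvBits8 c
        = [(((c.toNat >>> 7) % 2 : Nat) : Int), (((c.toNat >>> 6) % 2 : Nat) : Int),
           (((c.toNat >>> 5) % 2 : Nat) : Int), (((c.toNat >>> 4) % 2 : Nat) : Int),
           (((c.toNat >>> 3) % 2 : Nat) : Int), (((c.toNat >>> 2) % 2 : Nat) : Int),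
           (((c.toNat >>> 1) % 2 : Nat) : Int), (((c.toNat >>> 0) % 2 : Nat) : Int)] := rfl
    rw [hfmt]
    simp only [pvBitsGen, hbits, List.cons_append, List.nil_append]
    simp only [List.mapIdx_cons, List.mapIdx_nil, Nat.reduceAdd, Nat.reduceLT, if_true, if_false,
      List.set_cons_succ, List.set_cons_zero, List.getD_cons_succ, List.getD_cons_zero,
      List.zip_cons_cons, List.map_cons]
    rw [pvChunk3, pvChunk3, pvChunk3]
    rw [ihr]
    simp only [List.cons.injEq, Prod.mk.injEq]
    and_intros
    all_goals first
      | rfl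
      | trivial
      | exact pvStepEq c.toNat _ _
      | exact pvLastEq (i + 1 = n) _

-- the Python foldl building the bit stream is the flatMap
lemma pvBitsFold : ∀ (chars : List Char) (acc : List Int),
    chars.foldl (fun acc c => acc ++ pvBits8 c ++ [0]) acc
      = acc ++ chars.flatMap (fun c => pvBits8 c ++ [0]) := by
  intro chars
  induction chars with
  | nil => intro acc; simp
  | cons c rest ih =>
    intro acc
    rw [List.foldl_cons, ih, List.flatMap_cons]
    simp [List.append_assoc]

lemma pvFlatMapLen (chars : List Char) :
    (chars.flatMap (fun c => pvBits8 c ++ [0])).length = 9 * chars.length := by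
  induction chars with
  | nil => simp
  | cons c rest ih => simp [pvBits8, ih, List.flatMap_cons]; omega

-- patching the last separator to 1 gives the recursive bit stream
lemma pvSetLast : ∀ (chars : List Char) (i n : Nat), chars ≠ [] → i + chars.length = n →
    (chars.flatMap (fun c => pvBits8 c ++ [0])).set
        ((chars.flatMap (fun c => pvBits8 c ++ [0])).length - 1) 1
      = pvBitsGen chars i n := by
  intro chars
  induction chars with
  | nil => intro i n h; exact absurd rfl h
  | cons c rest ih =>
    intro i n _ hn
    rcases rest with _ | ⟨c2, rest2⟩
    · have h1 : i + 1 = n := by simpa using hn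
      simp only [List.flatMap_cons, List.flatMap_nil, List.append_nil, pvBitsGen]
      rw [show (pvBits8 c ++ [(0:Int)]).length = 9 from by simp [pvBits8]]
      rw [List.set_append_right _ _ (by simp [pvBits8])]
      simp [pvBits8, h1]
    · have hne : (c2 :: rest2 : List Char) ≠ [] := by simp
      have hF := pvFlatMapLen (c2 :: rest2)
      have hbl : (pvBits8 c ++ [(0:Int)]).length = 9 := by simp [pvBits8]
      have hni : ¬ (i + 1 = n) := by simp only [List.length_cons] at hn; omega
      rw [List.flatMap_cons, List.length_append, hbl]
      rw [List.set_append_right _ _ (by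
        rw [hbl]; simp only [List.length_cons] at hF; omega)]
      rw [hbl, show 9 + ((c2 :: rest2 : List Char).flatMap (fun c => pvBits8 c ++ [0])).length
            - 1 - 9
          = ((c2 :: rest2 : List Char).flatMap (fun c => pvBits8 c ++ [0])).length - 1 from by
        omega]
      rw [ih (i + 1) n hne (by simp only [List.length_cons] at hn ⊢; omega)]
      simp [pvBitsGen, hni, List.append_assoc]

-- ===== VERDICT (by name: the statement is the Claim_ definition above) =====
theorem pixel_modifier_spec : Claim_equal_pixel_modifier := by
  intro pix toEncode _ hpre
  unfold Spec_pixel_modifier pixel_modifier pixel_modifier_alt pvBinaryList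
  rcases hc : toEncode.toList with _ | ⟨c, rest⟩
  · simp [pvGoA, pvChunk3, PySem.List.slice]
  · have hne : toEncode.toList ≠ [] := by rw [hc]; simp
    rw [← hc]
    rw [List.length_map, pvBitsFold toEncode.toList []]
    simp only [List.nil_append]
    have hlen := pvFlatMapLen toEncode.toList
    have hnil : ¬ (toEncode.toList.flatMap (fun c => pvBits8 c ++ [0])).isEmpty := by
      rw [List.isEmpty_iff]; intro h
      rw [h] at hlen; rw [hc] at hlen; simp at hlen
    rw [if_neg hnil]
    rw [pvSetLast toEncode.toList 0 toEncode.toList.length hne (by omega)]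
    rw [pvBitsGen_len, PySem.List.slice_to_natCast]
    exact pvGoAB toEncode.toList 0 toEncode.toList.length pix (by simpa [Pre_pixel_modifier] using hpre)
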